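-- pv_equiv track=rewrite | github.com/hjkim22/Python_Coding_Test | 프로그래머스/1/42840. 모의고사/모의고사.py | solution
-- ===== SOURCE A (Python) =====
-- def solution(answers):
--     supoja_1 = [1, 2, 3, 4, 5]
--     supoja_2 = [2, 1, 2, 3, 2, 4, 2, 5]
--     supoja_3 = [3, 3, 1, 1, 2, 2, 4, 4, 5, 5]
--
--     scores = [0, 0, 0]
--
--     for i in range(len(answers)):
--         if answers[i] == supoja_1[i % len(supoja_1)]:
--             scores[0] += 1
--         if answers[i] == supoja_2[i % len(supoja_2)]:
--             scores[1] += 1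
--         if answers[i] == supoja_3[i % len(supoja_3)]:
--             scores[2] += 1
--
--     max_score = max(scores)
--     winners = [i + 1 for i, score in enumerate(scores) if score == max_score]
--
--     return winners
-- ===== SOURCE B (Python) =====
-- def solution(answers):
--     # Index the answers once by (position mod 40, value) -- 40 = lcm of the three
--     # pattern periods -- then read each guesser's score off the 40-slot table.
--     P = 40
--     cnt = {}
--     for i, a in enumerate(answers):
--         k = (i % P, a)
--         cnt[k] = cnt.get(k, 0) + 1
--     patterns = [[1, 2, 3, 4, 5],
--                 [2, 1, 2, 3, 2, 4, 2, 5],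
--                 [3, 3, 1, 1, 2, 2, 4, 4, 5, 5]]
--     scores = [sum(cnt.get((r, p[r % len(p)]), 0) for r in range(P))
--               for p in patterns]
--     best = max(scores)
--     return [k + 1 for k, s in enumerate(scores) if s == best]
-- ===== Notes on version B (the rewrite author's own statement) =====
-- stated objective: alternative
-- what changed: B builds a dict once, keyed by (position mod 40, answer) where 40 is the lcm of the three pattern periods, and then reads each guesser's score off that fixed 40-slot table, instead of A's loop that tests every answer position against all three cycled patterns inline.
import Mathlib
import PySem

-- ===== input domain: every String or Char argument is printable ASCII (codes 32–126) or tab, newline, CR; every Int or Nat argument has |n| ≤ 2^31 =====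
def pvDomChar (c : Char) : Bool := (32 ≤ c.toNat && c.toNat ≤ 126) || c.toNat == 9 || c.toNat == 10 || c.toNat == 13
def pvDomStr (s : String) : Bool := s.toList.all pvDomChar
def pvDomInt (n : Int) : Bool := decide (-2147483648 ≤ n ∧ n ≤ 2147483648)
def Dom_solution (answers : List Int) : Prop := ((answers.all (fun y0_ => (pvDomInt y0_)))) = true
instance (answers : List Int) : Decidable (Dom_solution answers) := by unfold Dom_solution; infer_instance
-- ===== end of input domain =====

-- B indexes the answers once into a dict keyed by (position mod 40, value) — 40 = lcm of the
-- three pattern periods — and reads each guesser's score off that 40-slot table, instead of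
-- A's per-index scan testing every answer against all three cycled patterns; objective: alternative.

-- ===== PORT A =====
def solution (answers : List Int) : List Int :=
  let supoja1 : List Int := [1, 2, 3, 4, 5]
  let supoja2 : List Int := [2, 1, 2, 3, 2, 4, 2, 5]
  let supoja3 : List Int := [3, 3, 1, 1, 2, 2, 4, 4, 5, 5]
  -- for i in range(len(answers)): three ifs updating scores[0..2]
  let scores : Int × Int × Int :=
    (PySem.List.pyRange 0 (PySem.List.len answers) 1).foldl
      (fun sc i =>
        let s1 := if PySem.List.pyGetD answers i 0 == PySem.List.pyGetD supoja1 (PySem.Int.mod i (PySem.List.len supoja1)) 0 then sc.1 + 1 else sc.1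
        let s2 := if PySem.List.pyGetD answers i 0 == PySem.List.pyGetD supoja2 (PySem.Int.mod i (PySem.List.len supoja2)) 0 then sc.2.1 + 1 else sc.2.1
        let s3 := if PySem.List.pyGetD answers i 0 == PySem.List.pyGetD supoja3 (PySem.Int.mod i (PySem.List.len supoja3)) 0 then sc.2.2 + 1 else sc.2.2
        (s1, s2, s3))
      (0, 0, 0)
  let scoresList : List Int := [scores.1, scores.2.1, scores.2.2]
  let maxScore : Int := (PySem.List.max? scoresList (fun y => y)).getD 0   -- max(scores); scoresList is never empty
  ((PySem.List.enumerate scoresList 0).filter (fun p => p.2 == maxScore)).map (fun p => p.1 + 1)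

-- ===== PORT B =====
-- the counting loop of Source B: for i, a in enumerate(answers): cnt[(i % 40, a)] = cnt.get((i % 40, a), 0) + 1
def pvCnt (answers : List Int) : PySem.Dict (Int × Int) Int :=
  (PySem.List.enumerate answers 0).foldl
    (fun d ia => d.modify (PySem.Int.mod ia.1 40, ia.2) 0 (· + 1)) PySem.Dict.empty

def solution_alt (answers : List Int) : List Int :=
  let cnt : PySem.Dict (Int × Int) Int := pvCnt answers
  let patterns : List (List Int) :=
    [[1, 2, 3, 4, 5], [2, 1, 2, 3, 2, 4, 2, 5], [3, 3, 1, 1, 2, 2, 4, 4, 5, 5]]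
  -- sum(cnt.get((r, p[r % len(p)]), 0) for r in range(40))
  let scores : List Int := patterns.map (fun p =>
    (PySem.List.pyRange 0 40 1).foldl
      (fun acc r => acc + cnt.getD (r, PySem.List.pyGetD p (PySem.Int.mod r (PySem.List.len p)) 0) 0) 0)
  let best : Int := (PySem.List.max? scores (fun y => y)).getD 0   -- max(scores); scores is never empty
  ((PySem.List.enumerate scores 0).filter (fun q => q.2 == best)).map (fun q => q.1 + 1)

-- ===== PRECONDITION & SPEC =====
def Spec_solution (answers : List Int) (out : List Int) : Prop := out = solution_alt answers
instance (answers : List Int) (out : List Int) : Decidable (Spec_solution answers out) := by unfold Spec_solution; infer_instance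

-- ===== CLAIM (what is proved, stated in full; the proofs are below) =====
def Claim_equal_solution : Prop := ∀ (answers : List Int), Dom_solution answers → Spec_solution answers (solution answers)

-- ===== LEMMAS AND PROOFS =====

-- the expected answer of pattern p at position r
def eKey (p : List Int) (r : Int) : Int :=
  PySem.List.pyGetD p (PySem.Int.mod r (PySem.List.len p)) 0

-- summing the indicator "k = (r, e r)" over a duplicate-free list containing k.1
theorem sum_indicator (rs : List Int) (k : Int × Int) (e : Int → Int)
    (hnd : rs.Nodup) (hmem : k.1 ∈ rs) :
    (rs.map (fun r => if k = (r, e r) then (1 : Int) else 0)).sum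
      = if k.2 = e k.1 then 1 else 0 := by
  obtain ⟨k1, k2⟩ := k
  induction rs with
  | nil => cases hmem
  | cons r t ih =>
    simp only [List.map_cons, List.sum_cons]
    rcases List.mem_cons.mp hmem with h1 | h1
    · -- k1 = r: the head carries the whole sum, the tail is all zeros
      subst h1
      have hz : (t.map (fun r => if (k1, k2) = (r, e r) then (1 : Int) else 0)).sum = 0 := by
        apply List.sum_eq_zero
        intro x hx
        simp only [List.mem_map] at hx
        obtain ⟨r', hr', rfl⟩ := hx
        have hne : k1 ≠ r' := fun h => (List.nodup_cons.mp hnd).1 (h ▸ hr')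
        simp [Prod.ext_iff, hne]
      rw [hz, add_zero]
      simp [Prod.ext_iff]
    · -- k1 ∈ t: the head is zero
      have hne : k1 ≠ r := fun h => (List.nodup_cons.mp hnd).1 (h ▸ h1)
      have h0 : ((k1, k2) = (r, e r)) = False := by
        simp [Prod.ext_iff, hne]
      simp only [h0, if_false, zero_add]
      exact ih (List.nodup_cons.mp hnd).2 h1

-- summing per-residue counts of (r, e r) over the residue list counts the matching pairs
theorem sum_count_pairs (rs : List Int) (ks : List (Int × Int)) (e : Int → Int)
    (hnd : rs.Nodup) (h : ∀ k ∈ ks, k.1 ∈ rs) :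
    (rs.map (fun r => ((ks.count (r, e r) : Int)))).sum
      = (ks.countP (fun k => k.2 == e k.1) : Int) := by
  induction ks with
  | nil => simp
  | cons k t ih =>
    have hk1 := h k (List.mem_cons_self)
    have ih' := ih (fun x hx => h x (List.mem_cons_of_mem _ hx))
    simp only [List.count_cons, List.countP_cons]
    push_cast
    have hsplit :
        (rs.map (fun r => ((t.count (r, e r) : Int) + if k = (r, e r) then 1 else 0))).sum
          = (rs.map (fun r => ((t.count (r, e r) : Int)))).sum
            + (rs.map (fun r => if k = (r, e r) then (1 : Int) else 0)).sum := by
      rw [PySem.List.sum_map_add_int]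
    simp only [beq_iff_eq]
    rw [hsplit, ih', sum_indicator rs k e hnd hk1]

-- cycling through the lcm period 40 does not change the expected answer
theorem eKey_mod40 (p : List Int) (hpos : 0 < p.length) (j : Int)
    (hdvd : ((p.length : Int)) ∣ 40) :
    eKey p (PySem.Int.mod j 40) = eKey p j := by
  unfold eKey
  have hm : (0 : Int) < (p.length : Int) := by exact_mod_cast hpos
  have h40 : (0 : Int) < 40 := by norm_num
  rw [PySem.List.len_eq, PySem.Int.mod_eq_emod_of_pos h40,
      PySem.Int.mod_eq_emod_of_pos hm, PySem.Int.mod_eq_emod_of_pos hm,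
      Int.emod_emod_of_dvd j hdvd]

-- B's counting dict is Counter of the (i % 40, answers[i]) pairs
theorem pvCnt_eq_counter (answers : List Int) :
    pvCnt answers
      = PySem.Dict.counter
          ((PySem.List.enumerate answers 0).map (fun ia => (PySem.Int.mod ia.1 40, ia.2))) := by
  unfold pvCnt PySem.Dict.counter
  rw [List.foldl_map]

-- B's table read for pattern p is the straight count of matching positions
theorem alt_score_eq (answers p : List Int) (hpos : 0 < p.length)
    (hdvd : ((p.length : Int)) ∣ 40) :
    (PySem.List.pyRange 0 40 1).foldl
        (fun acc r => acc + (pvCnt answers).getD (r, PySem.List.pyGetD p (PySem.Int.mod r (PySem.List.len p)) 0) 0) 0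
      = 0 + ((PySem.List.pyRange 0 (PySem.List.len answers) 1).countP
          (fun j => PySem.List.pyGetD answers j 0 == eKey p j) : Int) := by
  have hks : ∀ k ∈ (PySem.List.enumerate answers 0).map (fun ia => (PySem.Int.mod ia.1 40, ia.2)),
      k.1 ∈ PySem.List.pyRange 0 40 1 := by
    intro k hk
    simp only [List.mem_map] at hk
    obtain ⟨ia, _, rfl⟩ := hk
    rw [PySem.List.mem_pyRange_one]
    exact ⟨PySem.Int.mod_nonneg _ (by norm_num), PySem.Int.mod_lt _ (by norm_num)⟩
  rw [PySem.List.foldl_add, pvCnt_eq_counter]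
  simp only [PySem.Dict.getD_counter]
  rw [show (fun r => ((((PySem.List.enumerate answers 0).map (fun ia => (PySem.Int.mod ia.1 40, ia.2))).count
        (r, PySem.List.pyGetD p (PySem.Int.mod r (PySem.List.len p)) 0) : Int)))
      = (fun r => ((((PySem.List.enumerate answers 0).map (fun ia => (PySem.Int.mod ia.1 40, ia.2))).count
        (r, eKey p r) : Int))) from rfl]
  rw [sum_count_pairs _ _ (eKey p) (PySem.List.nodup_pyRange_one 0 40) hks]
  rw [List.countP_map]
  rw [PySem.List.enumerate_eq_map_pyRange (d := 0), List.countP_map]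
  congr 2
  apply List.countP_congr
  intro j _
  simp only [Function.comp_apply]
  rw [eKey_mod40 p hpos j hdvd]

-- a fold of a triple-of-accumulators step splits into three independent folds
theorem foldl_triple (l : List Int)
    (g1 g2 g3 : Int → Int → Int) (c1 c2 c3 : Int) :
    l.foldl (fun (sc : Int × Int × Int) i => (g1 sc.1 i, g2 sc.2.1 i, g3 sc.2.2 i)) (c1, c2, c3)
      = (l.foldl g1 c1, l.foldl g2 c2, l.foldl g3 c3) := by
  induction l generalizing c1 c2 c3 with
  | nil => rfl
  | cons x xs ih => simp only [List.foldl_cons]; exact ih _ _ _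

-- ===== VERDICT (by name: the statement is the Claim_ definition above) =====
theorem solution_spec : Claim_equal_solution := by
  intro answers _
  unfold Spec_solution solution solution_alt
  simp only [List.map_cons, List.map_nil]
  rw [show (fun (sc : Int × Int × Int) (i : Int) =>
        let s1 := if PySem.List.pyGetD answers i 0 == PySem.List.pyGetD [(1:Int),2,3,4,5] (PySem.Int.mod i (PySem.List.len [(1:Int),2,3,4,5])) 0 then sc.1 + 1 else sc.1
        let s2 := if PySem.List.pyGetD answers i 0 == PySem.List.pyGetD [(2:Int),1,2,3,2,4,2,5] (PySem.Int.mod i (PySem.List.len [(2:Int),1,2,3,2,4,2,5])) 0 then sc.2.1 + 1 else sc.2.1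
        let s3 := if PySem.List.pyGetD answers i 0 == PySem.List.pyGetD [(3:Int),3,1,1,2,2,4,4,5,5] (PySem.Int.mod i (PySem.List.len [(3:Int),3,1,1,2,2,4,4,5,5])) 0 then sc.2.2 + 1 else sc.2.2
        (s1, s2, s3))
      = (fun (sc : Int × Int × Int) (i : Int) =>
          ((fun (a j : Int) => if PySem.List.pyGetD answers j 0 == eKey [(1:Int),2,3,4,5] j then a + 1 else a) sc.1 i,
           (fun (a j : Int) => if PySem.List.pyGetD answers j 0 == eKey [(2:Int),1,2,3,2,4,2,5] j then a + 1 else a) sc.2.1 i,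
           (fun (a j : Int) => if PySem.List.pyGetD answers j 0 == eKey [(3:Int),3,1,1,2,2,4,4,5,5] j then a + 1 else a) sc.2.2 i)) from rfl,
      foldl_triple (PySem.List.pyRange 0 (PySem.List.len answers) 1)
        (fun (a j : Int) => if PySem.List.pyGetD answers j 0 == eKey [(1:Int),2,3,4,5] j then a + 1 else a)
        (fun (a j : Int) => if PySem.List.pyGetD answers j 0 == eKey [(2:Int),1,2,3,2,4,2,5] j then a + 1 else a)
        (fun (a j : Int) => if PySem.List.pyGetD answers j 0 == eKey [(3:Int),3,1,1,2,2,4,4,5,5] j then a + 1 else a)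
        0 0 0]
  rw [PySem.List.foldl_if_add_one, PySem.List.foldl_if_add_one, PySem.List.foldl_if_add_one]
  rw [alt_score_eq answers [(1:Int),2,3,4,5] (by norm_num) (by norm_num),
      alt_score_eq answers [(2:Int),1,2,3,2,4,2,5] (by norm_num) (by norm_num),
      alt_score_eq answers [(3:Int),3,1,1,2,2,4,4,5,5] (by norm_num) (by norm_num)]
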